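-- pv_equiv track=rewrite | github.com/ChoiRang/study | pythonProject/programmers/lv3/공 이동 시뮬레이션.py | solution
-- ===== SOURCE A (Python) =====
-- import collections
--
-- def solution(n, m, x, y, queries):
--     h = collections.deque(queries)
--     xs, xe, ys, ye = x, x, y, y
--     while h:
--         dir, dist = h.pop()
--         if dir == 0: # left -y
--             if ys == 0:
--                 ye = min(m-1, ye+dist)
--             else:
--                 if ys+dist > m-1: return 0
--                 ys = min(m-1, ys+dist)
--                 ye = min(m-1, ye+dist)
--         elif dir == 1: # 우
--             if ye == m-1:
--                 ys = max(0, ys-dist)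
--             else:
--                 if ye-dist < 0: return 0
--                 ys = max(0, ys-dist)
--                 ye = max(0, ye-dist)
--         elif dir == 2: # 상
--             if xs == 0:
--                 xe = min(n-1, xe+dist)
--             else:
--                 if xs+dist > n-1: return 0
--                 xs = min(n-1, xs+dist)
--                 xe = min(n-1, xe+dist)
--         elif dir == 3:  # 하
--             if xe == n-1:
--                 xs = max(0, xs-dist)
--             else:
--                 if xe-dist < 0: return 0
--                 xs = max(0, xs-dist)
--                 xe = max(0, xe-dist)
--         if xe < xs or ye < ys:
--             return 0
--     return (xe-xs+1) * (ye-ys+1)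
-- ===== SOURCE B (Python) =====
-- def _grow(lo, hi, size, d):
--     # Preimage of the interval [lo, hi] under one canonical move that shifts the
--     # ball toward index 0 by d (clamped at the 0 edge): the interval grows by d
--     # toward size-1; None means no start cell can end inside [lo, hi].
--     if lo != 0:
--         if lo + d > size - 1:
--             return None
--         lo += d
--     hi = min(size - 1, hi + d)
--     return None if hi < lo else (lo, hi)
--
--
-- def _axis(start, size, moves):
--     # Structural recursion on the move list in original order: the head move is
--     # the last one played, so it is applied to the box of the remaining moves.
--     if not moves:
--         return (start, start)
--     box = _axis(start, size, moves[1:])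
--     if box is None:
--         return None
--     lo, hi = box
--     up, d = moves[0]
--     if up:
--         return _grow(lo, hi, size, d)
--     # a move toward size-1 is the 0-ward canonical move in the mirrored axis
--     r = _grow(size - 1 - hi, size - 1 - lo, size, d)
--     return None if r is None else (size - 1 - r[1], size - 1 - r[0])
--
--
-- def solution(n, m, x, y, queries):
--     xq = [(d == 2, t) for d, t in queries if d in (2, 3)]
--     yq = [(d == 0, t) for d, t in queries if d in (0, 1)]
--     bx = _axis(x, n, xq)
--     by = _axis(y, m, yq)
--     if bx is None or by is None:
--         return 0
--     return (bx[1] - bx[0] + 1) * (by[1] - by[0] + 1)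
-- ===== Notes on version B (the rewrite author's own statement) =====
-- stated objective: alternative
-- what changed: Replaces the deque loop with early returns by two independent per-axis structural recursions over the filtered move lists, each reduced by reflection symmetry to a single canonical 'grow toward size-1' primitive with None propagation; the answer is the product of the two axis interval lengths.
import Mathlib
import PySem

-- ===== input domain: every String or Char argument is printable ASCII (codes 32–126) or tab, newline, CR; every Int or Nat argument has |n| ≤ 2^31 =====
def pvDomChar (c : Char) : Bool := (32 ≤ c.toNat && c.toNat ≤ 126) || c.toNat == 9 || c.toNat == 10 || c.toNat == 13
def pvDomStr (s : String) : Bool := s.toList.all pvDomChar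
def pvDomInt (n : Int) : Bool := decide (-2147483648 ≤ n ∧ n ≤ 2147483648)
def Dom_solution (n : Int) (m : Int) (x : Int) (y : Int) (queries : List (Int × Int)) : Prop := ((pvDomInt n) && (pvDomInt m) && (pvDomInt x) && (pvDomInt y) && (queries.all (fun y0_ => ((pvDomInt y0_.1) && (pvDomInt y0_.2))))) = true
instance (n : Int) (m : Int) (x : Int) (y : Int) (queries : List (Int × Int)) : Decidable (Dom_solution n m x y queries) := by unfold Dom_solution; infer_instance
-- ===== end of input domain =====

-- B replaces A's interleaved deque loop by two independent per-axis structural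
-- recursions, each reduced by reflection symmetry to one canonical grow
-- primitive with Option/None propagation (objective: alternative).

-- ===== PORT A =====
-- A pops from the right of a deque of queries: the loop walks queries.reverse.
def solLoop (n : Int) (m : Int) : List (Int × Int) → Int → Int → Int → Int → Int
  | [], xs, xe, ys, ye => (xe - xs + 1) * (ye - ys + 1)
  | (dir, dist) :: h, xs, xe, ys, ye =>
    if dir = 0 then
      if ys = 0 then
        if xe < xs ∨ min (m-1) (ye+dist) < ys then 0
        else solLoop n m h xs xe ys (min (m-1) (ye+dist))
      else if ys + dist > m - 1 then 0
      else
        if xe < xs ∨ min (m-1) (ye+dist) < min (m-1) (ys+dist) then 0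
        else solLoop n m h xs xe (min (m-1) (ys+dist)) (min (m-1) (ye+dist))
    else if dir = 1 then
      if ye = m - 1 then
        if xe < xs ∨ ye < max 0 (ys-dist) then 0
        else solLoop n m h xs xe (max 0 (ys-dist)) ye
      else if ye - dist < 0 then 0
      else
        if xe < xs ∨ max 0 (ye-dist) < max 0 (ys-dist) then 0
        else solLoop n m h xs xe (max 0 (ys-dist)) (max 0 (ye-dist))
    else if dir = 2 then
      if xs = 0 then
        if min (n-1) (xe+dist) < xs ∨ ye < ys then 0
        else solLoop n m h xs (min (n-1) (xe+dist)) ys ye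
      else if xs + dist > n - 1 then 0
      else
        if min (n-1) (xe+dist) < min (n-1) (xs+dist) ∨ ye < ys then 0
        else solLoop n m h (min (n-1) (xs+dist)) (min (n-1) (xe+dist)) ys ye
    else if dir = 3 then
      if xe = n - 1 then
        if xe < max 0 (xs-dist) ∨ ye < ys then 0
        else solLoop n m h (max 0 (xs-dist)) xe ys ye
      else if xe - dist < 0 then 0
      else
        if max 0 (xe-dist) < max 0 (xs-dist) ∨ ye < ys then 0
        else solLoop n m h (max 0 (xs-dist)) (max 0 (xe-dist)) ys ye
    else
      if xe < xs ∨ ye < ys then 0 else solLoop n m h xs xe ys ye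

def solution (n : Int) (m : Int) (x : Int) (y : Int) (queries : List (Int × Int)) : Int :=
  solLoop n m queries.reverse x x y y

-- ===== PORT B =====
-- preimage of [lo, hi] under one canonical 0-ward move by d (Source B's _grow)
def grow (lo : Int) (hi : Int) (size : Int) (d : Int) : Option (Int × Int) :=
  if lo ≠ 0 ∧ lo + d > size - 1 then none
  else
    let lo' := if lo ≠ 0 then lo + d else lo
    let hi' := min (size - 1) (hi + d)
    if hi' < lo' then none else some (lo', hi')

-- Source B's _axis: recursion on the move list in original order, head applied last;
-- a (size-1)-ward move is the canonical move in the mirrored axis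
def axisBox (start : Int) (size : Int) : List (Bool × Int) → Option (Int × Int)
  | [] => some (start, start)
  | (up, d) :: rest =>
    match axisBox start size rest with
    | none => none
    | some (lo, hi) =>
      if up then grow lo hi size d
      else
        match grow (size - 1 - hi) (size - 1 - lo) size d with
        | none => none
        | some ab => some (size - 1 - ab.2, size - 1 - ab.1)

def solution_alt (n : Int) (m : Int) (x : Int) (y : Int) (queries : List (Int × Int)) : Int :=
  let xq := queries.filterMap (fun q => if q.1 = 2 ∨ q.1 = 3 then some (decide (q.1 = 2), q.2) else none)
  let yq := queries.filterMap (fun q => if q.1 = 0 ∨ q.1 = 1 then some (decide (q.1 = 0), q.2) else none)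
  match axisBox x n xq, axisBox y m yq with
  | some bx, some by' => (bx.2 - bx.1 + 1) * (by'.2 - by'.1 + 1)
  | _, _ => 0

-- ===== PRECONDITION & SPEC =====
def Spec_solution (n : Int) (m : Int) (x : Int) (y : Int) (queries : List (Int × Int)) (out : Int) : Prop := out = solution_alt n m x y queries
instance (n : Int) (m : Int) (x : Int) (y : Int) (queries : List (Int × Int)) (out : Int) : Decidable (Spec_solution n m x y queries out) := by unfold Spec_solution; infer_instance

-- ===== CLAIM (what is proved, stated in full; the proofs are below) =====
def Claim_equal_solution : Prop := ∀ (n : Int) (m : Int) (x : Int) (y : Int) (queries : List (Int × Int)), Dom_solution n m x y queries → Spec_solution n m x y queries (solution n m x y queries)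

-- ===== LEMMAS AND PROOFS =====

-- one B step on an optional box, in the shape axisBox applies it
def stepB (size : Int) (q : Bool × Int) (box : Option (Int × Int)) : Option (Int × Int) :=
  match box with
  | none => none
  | some (lo, hi) =>
    if q.1 then grow lo hi size q.2
    else
      match grow (size - 1 - hi) (size - 1 - lo) size q.2 with
      | none => none
      | some ab => some (size - 1 - ab.2, size - 1 - ab.1)

-- left-to-right threading of stepB (the processing order of A's loop)
def gAxis (size : Int) : List (Bool × Int) → Option (Int × Int) → Option (Int × Int)
  | [], box => box
  | q :: rest, box => gAxis size rest (stepB size q box)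

def boxMul : Option (Int × Int) → Option (Int × Int) → Int
  | some bx, some by' => (bx.2 - bx.1 + 1) * (by'.2 - by'.1 + 1)
  | _, _ => 0

def xMoves (l : List (Int × Int)) : List (Bool × Int) :=
  l.filterMap (fun q => if q.1 = 2 ∨ q.1 = 3 then some (decide (q.1 = 2), q.2) else none)

def yMoves (l : List (Int × Int)) : List (Bool × Int) :=
  l.filterMap (fun q => if q.1 = 0 ∨ q.1 = 1 then some (decide (q.1 = 0), q.2) else none)

lemma gAxis_none (size : Int) (l : List (Bool × Int)) : gAxis size l none = none := by
  induction l with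
  | nil => rfl
  | cons q rest ih => simp [gAxis, stepB, ih]

lemma gAxis_append (size : Int) (l : List (Bool × Int)) (q : Bool × Int)
    (box : Option (Int × Int)) :
    gAxis size (l ++ [q]) box = stepB size q (gAxis size l box) := by
  induction l generalizing box with
  | nil => rfl
  | cons p rest ih => simp [gAxis, ih]

lemma axisBox_eq_gAxis (start size : Int) (l : List (Bool × Int)) :
    axisBox start size l = gAxis size l.reverse (some (start, start)) := by
  induction l with
  | nil => rfl
  | cons q rest ih =>
    obtain ⟨up, d⟩ := q
    show (match axisBox start size rest with
      | none => none
      | some (lo, hi) =>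
        if up then grow lo hi size d
        else
          match grow (size - 1 - hi) (size - 1 - lo) size d with
          | none => none
          | some ab => some (size - 1 - ab.2, size - 1 - ab.1)) = _
    rw [ih, List.reverse_cons, gAxis_append]
    cases gAxis size rest.reverse (some (start, start)) with
    | none => rfl
    | some b => obtain ⟨lo, hi⟩ := b; rfl

lemma boxMul_none_left (b : Option (Int × Int)) : boxMul none b = 0 := by
  rcases b with _ | ⟨p, q⟩ <;> rfl

lemma boxMul_none_right (a : Option (Int × Int)) : boxMul a none = 0 := by
  rcases a with _ | ⟨p, q⟩ <;> rfl

-- bridge: a B step written in the shape of A's branches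
set_option maxHeartbeats 1600000 in
lemma stepB_up (size d lo hi : Int) :
    stepB size (true, d) (some (lo, hi)) =
      if lo = 0 then
        (if min (size-1) (hi+d) < lo then none else some (lo, min (size-1) (hi+d)))
      else if lo + d > size - 1 then none
      else if min (size-1) (hi+d) < min (size-1) (lo+d) then none
      else some (min (size-1) (lo+d), min (size-1) (hi+d)) := by
  simp only [stepB, grow, min_def]
  split_ifs
  all_goals try rfl
  all_goals try (simp only [Option.some.injEq, Prod.mk.injEq]; constructor <;> omega)
  all_goals try (exfalso; omega)
  all_goals exact absurd trivial (by assumption)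

set_option maxHeartbeats 1600000 in
lemma stepB_down (size d lo hi : Int) :
    stepB size (false, d) (some (lo, hi)) =
      if hi = size - 1 then
        (if hi < max 0 (lo-d) then none else some (max 0 (lo-d), hi))
      else if hi - d < 0 then none
      else if max 0 (hi-d) < max 0 (lo-d) then none
      else some (max 0 (lo-d), max 0 (hi-d)) := by
  simp only [stepB, grow, min_def, max_def]
  split_ifs
  all_goals try rfl
  all_goals try (simp only [Option.some.injEq, Prod.mk.injEq]; constructor <;> omega)
  all_goals try (exfalso; omega)
  all_goals exact absurd trivial (by assumption)

set_option maxHeartbeats 1600000 in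
lemma solLoop_eq_axes (n m : Int) (l : List (Int × Int)) :
    ∀ xs xe ys ye : Int, xs ≤ xe → ys ≤ ye →
      solLoop n m l xs xe ys ye =
        boxMul (gAxis n (xMoves l) (some (xs, xe))) (gAxis m (yMoves l) (some (ys, ye))) := by
  induction l with
  | nil => intro xs xe ys ye _ _; simp [solLoop, gAxis, boxMul, xMoves, yMoves]
  | cons q rest ih =>
    obtain ⟨dir, dist⟩ := q
    intro xs xe ys ye hx hy
    by_cases h0 : dir = 0
    · subst h0
      simp only [solLoop, xMoves, yMoves, List.filterMap_cons, Int.reduceEq,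
        decide_true, decide_false, reduceIte, or_self, or_false, false_or, true_or, or_true,
        gAxis, stepB_down, stepB_up]
      split_ifs <;>
        first
          | exact ih _ _ _ _ (by omega) (by omega)
          | (exfalso; push Not at *; omega)
          | (rw [gAxis_none]; first | rw [boxMul_none_right] | rw [boxMul_none_left])
    by_cases h1 : dir = 1
    · subst h1
      simp only [solLoop, xMoves, yMoves, List.filterMap_cons, Int.reduceEq,
        decide_true, decide_false, reduceIte, or_self, or_false, false_or, true_or, or_true,
        gAxis, stepB_down, stepB_up]
      split_ifs <;>
        first
          | exact ih _ _ _ _ (by omega) (by omega)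
          | (exfalso; push Not at *; omega)
          | (rw [gAxis_none]; first | rw [boxMul_none_right] | rw [boxMul_none_left])
    by_cases h2 : dir = 2
    · subst h2
      simp only [solLoop, xMoves, yMoves, List.filterMap_cons, Int.reduceEq,
        decide_true, decide_false, reduceIte, or_self, or_false, false_or, true_or, or_true,
        gAxis, stepB_down, stepB_up]
      split_ifs <;>
        first
          | exact ih _ _ _ _ (by omega) (by omega)
          | (exfalso; push Not at *; omega)
          | (rw [gAxis_none]; first | rw [boxMul_none_right] | rw [boxMul_none_left])
    by_cases h3 : dir = 3
    · subst h3
      simp only [solLoop, xMoves, yMoves, List.filterMap_cons, Int.reduceEq,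
        decide_true, decide_false, reduceIte, or_self, or_false, false_or, true_or, or_true,
        gAxis, stepB_down, stepB_up]
      split_ifs <;>
        first
          | exact ih _ _ _ _ (by omega) (by omega)
          | (exfalso; push Not at *; omega)
          | (rw [gAxis_none]; first | rw [boxMul_none_right] | rw [boxMul_none_left])
    -- dir outside 0..3: the query touches neither axis and the check cannot fire
    simp only [solLoop, xMoves, yMoves, List.filterMap_cons, if_neg h0, if_neg h1,
      if_neg h2, if_neg h3,
      if_neg (show ¬(dir = 2 ∨ dir = 3) from fun h => h.elim h2 h3),
      if_neg (show ¬(dir = 0 ∨ dir = 1) from fun h => h.elim h0 h1)]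
    rw [if_neg (show ¬(xe < xs ∨ ye < ys) by omega)]
    exact ih _ _ _ _ hx hy

lemma filterMap_reverse' {α β : Type} (f : α → Option β) (l : List α) :
    l.reverse.filterMap f = (l.filterMap f).reverse := by
  induction l with
  | nil => rfl
  | cons a l ih =>
    simp only [List.reverse_cons, List.filterMap_append, List.filterMap_cons, ih]
    cases f a <;> simp

-- ===== VERDICT (by name: the statement is the Claim_ definition above) =====
theorem solution_spec : Claim_equal_solution := by
  intro n m x y queries _
  unfold Spec_solution solution solution_alt
  rw [solLoop_eq_axes n m queries.reverse x x y y le_rfl le_rfl]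
  show boxMul (gAxis n (xMoves queries.reverse) _) (gAxis m (yMoves queries.reverse) _) =
    match axisBox x n (xMoves queries), axisBox y m (yMoves queries) with
    | some bx, some by' => (bx.2 - bx.1 + 1) * (by'.2 - by'.1 + 1)
    | _, _ => 0
  rw [axisBox_eq_gAxis, axisBox_eq_gAxis, show xMoves queries.reverse = (xMoves queries).reverse from filterMap_reverse' _ _, show yMoves queries.reverse = (yMoves queries).reverse from filterMap_reverse' _ _]
  cases gAxis n (xMoves queries).reverse (some (x, x)) <;>
    cases gAxis m (yMoves queries).reverse (some (y, y)) <;> rfl
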